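-- pv_equiv track=rewrite | github.com/Chenlin1984/Taiwan-Lotto-Intelligence | src/utils.py | compute_missing_periods
-- ===== SOURCE A (Python) =====
-- from typing import Dict, List, Set, Tuple
--
-- def compute_missing_periods(history: List[List[int]]) -> Dict[int, int]:
--     """
--     計算每個號碼（1-49）距今已遺漏幾期。
--     遺漏 0 表示最近一期有出現。
--
--     演算法：從最新一期往回掃，連續未出現的期數即為遺漏期數，
--     遇到第一次出現即停止計數。
--     """
--     missing = {}
--     for n in range(1, 50):
--         count = 0
--         for draw in reversed(history):
--             if n in draw:
--                 break
--             count += 1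
--         missing[n] = count
--     return missing
-- ===== SOURCE B (Python) =====
-- def compute_missing_periods(history):
--     # Single reverse pass: record, for each number, the index of the most
--     # recent draw containing it; numbers never drawn default to len(history).
--     first_seen = {}
--     for count, draw in enumerate(reversed(history)):
--         for n in draw:
--             first_seen.setdefault(n, count)
--     total = len(history)
--     return {n: first_seen.get(n, total) for n in range(1, 50)}
-- ===== Notes on version B (the rewrite author's own statement) =====
-- stated objective: alternative
-- what changed: Instead of re-scanning the reversed history once per number (49 break-on-hit scans), B makes a single reverse pass recording each number's first-appearance index with setdefault and reads off all 49 answers from that dict; A's early breaks make it fast in practice, so B trades 49 scans for one full pass.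
import Mathlib
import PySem

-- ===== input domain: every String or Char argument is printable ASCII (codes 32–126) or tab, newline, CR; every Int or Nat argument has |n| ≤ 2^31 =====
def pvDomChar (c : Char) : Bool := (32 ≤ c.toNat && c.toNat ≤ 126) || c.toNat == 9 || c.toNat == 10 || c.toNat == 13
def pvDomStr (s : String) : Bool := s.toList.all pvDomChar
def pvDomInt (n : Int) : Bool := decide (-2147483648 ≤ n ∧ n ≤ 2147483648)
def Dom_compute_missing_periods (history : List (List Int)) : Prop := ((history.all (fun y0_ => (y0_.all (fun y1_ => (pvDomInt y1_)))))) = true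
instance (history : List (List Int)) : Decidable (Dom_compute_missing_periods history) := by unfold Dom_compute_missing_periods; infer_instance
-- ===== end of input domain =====

-- B replaces A's 49 break-on-hit reverse scans by one full reverse pass building a
-- first-appearance dict (objective: alternative single-pass algorithm, same result).

-- ===== PORT A =====
-- inner loop of A: 'count = 0; for draw in reversed(history): if n in draw: break; count += 1'
def pvLoopA (n : Int) (count : Int) : List (List Int) → Int
  | [] => count
  | draw :: rest => if draw.contains n then count else pvLoopA n (count + 1) rest

def compute_missing_periods (history : List (List Int)) : List (Int × Int) :=
  ((PySem.List.pyRange 1 50 1).foldl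
      (fun missing n => missing.insert n (pvLoopA n 0 history.reverse))
      PySem.Dict.empty).items

-- ===== PORT B =====
def compute_missing_periods_alt (history : List (List Int)) : List (Int × Int) :=
  let first_seen :=
    (PySem.List.enumerate history.reverse 0).foldl
      (fun d p => p.2.foldl (fun d n => d.setdefault n p.1) d)
      (PySem.Dict.empty : PySem.Dict Int Int)
  (PySem.List.pyRange 1 50 1).map (fun n => (n, first_seen.getD n (history.length : Int)))

-- ===== PRECONDITION & SPEC =====
def Spec_compute_missing_periods (history : List (List Int)) (out : List (Int × Int)) : Prop := out = compute_missing_periods_alt history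
instance (history : List (List Int)) (out : List (Int × Int)) : Decidable (Spec_compute_missing_periods history out) := by unfold Spec_compute_missing_periods; infer_instance

-- ===== CLAIM (what is proved, stated in full; the proofs are below) =====
def Claim_equal_compute_missing_periods : Prop := ∀ (history : List (List Int)), Dom_compute_missing_periods history → Spec_compute_missing_periods history (compute_missing_periods history)

-- ===== LEMMAS AND PROOFS =====

-- first index ≥ c (counting from c) of a draw containing n, none if absent
def pvFirstHit (n : Int) : List (List Int) → Int → Option Int
  | [], _ => none
  | draw :: rest, c => if draw.contains n then some c else pvFirstHit n rest (c + 1)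

theorem pv_setdefault_get?_ne (d : PySem.Dict Int Int) (m n c : Int) (h : n ≠ m) :
    (d.setdefault m c).get? n = d.get? n := by
  by_cases hc : d.contains m
  · rw [PySem.Dict.setdefault_of_contains d c hc]
  · rw [PySem.Dict.setdefault_of_not_contains d c (by simpa using hc),
        PySem.Dict.get?_insert_of_ne d c h]

theorem pv_inner (n c : Int) (draw : List Int) (d : PySem.Dict Int Int) :
    (draw.foldl (fun d m => d.setdefault m c) d).get? n =
      match d.get? n with
      | some v => some v
      | none => if draw.contains n then some c else none := by
  induction draw generalizing d with
  | nil => cases h : d.get? n <;> simp [h]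
  | cons m rest ih =>
    simp only [List.foldl_cons]
    rw [ih]
    by_cases hnm : n = m
    · subst hnm
      rcases hg : d.get? n with _ | v
      · have hc : d.contains n = false := by
          rw [PySem.Dict.contains_eq_isSome_get?, hg]; rfl
        rw [PySem.Dict.setdefault_of_not_contains d c hc,
            PySem.Dict.get?_insert_self]
        simp
      · have hc : d.contains n = true := by
          rw [PySem.Dict.contains_eq_isSome_get?, hg]; rfl
        rw [PySem.Dict.setdefault_of_contains d c hc, hg]
    · rw [pv_setdefault_get?_ne d m n c hnm]
      rcases h : d.get? n with _ | v
      · simp [hnm]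
      · simp

theorem pv_scan (n : Int) (rev : List (List Int)) (c : Int) (d : PySem.Dict Int Int) :
    ((PySem.List.enumerate rev c).foldl
        (fun d p => p.2.foldl (fun d m => d.setdefault m p.1) d) d).get? n =
      match d.get? n with
      | some v => some v
      | none => pvFirstHit n rev c := by
  induction rev generalizing c d with
  | nil => cases h : d.get? n <;> simp [PySem.List.enumerate_nil, pvFirstHit, h]
  | cons draw rest ih =>
    rw [PySem.List.enumerate_cons]
    simp only [List.foldl_cons]
    rw [ih, pv_inner n c draw d, pvFirstHit]
    rcases h : d.get? n with _ | v
    · by_cases hm : n ∈ draw <;> simp [hm]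
    · rfl

theorem pv_hit_loop (n : Int) (rev : List (List Int)) (c : Int) :
    (pvFirstHit n rev c).getD (c + rev.length) = pvLoopA n c rev := by
  induction rev generalizing c with
  | nil => simp [pvFirstHit, pvLoopA]
  | cons draw rest ih =>
    by_cases hm : n ∈ draw
    · simp [pvFirstHit, pvLoopA, hm]
    · have hc : draw.contains n = false := by simpa using hm
      simp only [pvFirstHit, pvLoopA, hc, Bool.false_eq_true, if_false]
      rw [← ih (c + 1)]
      congr 1
      simp only [List.length_cons]
      push_cast
      ring

theorem pv_getD_eq (history : List (List Int)) (n : Int) :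
    ((PySem.List.enumerate history.reverse 0).foldl
        (fun d p => p.2.foldl (fun d m => d.setdefault m p.1) d)
        (PySem.Dict.empty : PySem.Dict Int Int)).getD n (history.length : Int) =
      pvLoopA n 0 history.reverse := by
  rw [PySem.Dict.getD_eq_get?_getD, pv_scan n history.reverse 0 PySem.Dict.empty]
  simp only [PySem.Dict.get?_empty]
  have : (history.length : Int) = 0 + (history.reverse.length : Int) := by
    simp
  rw [this, pv_hit_loop n history.reverse 0]

-- ===== VERDICT (by name: the statement is the Claim_ definition above) =====
theorem compute_missing_periods_spec : Claim_equal_compute_missing_periods := by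
  intro history _
  unfold Spec_compute_missing_periods compute_missing_periods compute_missing_periods_alt
  refine (PySem.Dict.items_foldl_insert_fresh (PySem.List.pyRange 1 50 1)
        (fun n => n) (fun n => pvLoopA n 0 history.reverse) PySem.Dict.empty
        (fun a _ => PySem.Dict.contains_empty a)
        (by simpa using PySem.List.nodup_pyRange_one 1 50)).trans ?_
  rw [show (PySem.Dict.empty : PySem.Dict Int Int).items = [] from rfl, List.nil_append]
  exact List.map_congr_left (fun n _ => by rw [pv_getD_eq history n])
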